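-- pv_equiv track=rewrite | github.com/tommyskeff/bio-practice | 2021/q1-2021.py | is_pat
-- ===== SOURCE A (Python) =====
-- def is_pat(word: str) -> bool:
--     if len(word) < 2:
--         return True
--     for m in range(1, len(word)):
--         s1, s2 = word[:m], word[m:]
--         if min([ord(c) for c in s1]) <= max([ord(c) for c in s2]):
--             continue
--
--         if is_pat(s1[::-1]) and is_pat(s2[::-1]):
--             return True
--
--     return False
-- ===== SOURCE B (Python) =====
-- # Same test, but each call precomputes suffix maxima once and sweeps a running
-- # prefix minimum, so the per-split min/max scans of A disappear.
--
-- def _sufmax(cs):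
--     # out[i] == max(cs[i:]); built back-to-front from a running maximum
--     out = []
--     hi = None
--     for c in reversed(cs):
--         hi = c if hi is None or c > hi else hi
--         out.append(hi)
--     out.reverse()
--     return out
--
--
-- def _pat(cs):
--     n = len(cs)
--     if n < 2:
--         return True
--     suf = _sufmax(cs)
--     lo = cs[0]
--     for m in range(1, n):
--         if lo > suf[m] and _pat(cs[:m][::-1]) and _pat(cs[m:][::-1]):
--             return True
--         if cs[m] < lo:
--             lo = cs[m]
--     return False
--
--
-- def is_pat(word: str) -> bool:
--     return _pat([ord(c) for c in word])
-- ===== Notes on version B (the rewrite author's own statement) =====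
-- stated objective: faster
-- what changed: Each call now precomputes the suffix maxima once and sweeps a running prefix minimum, so A's per-split min/max scans over both halves disappear; the split test becomes O(1) per split point.
import Mathlib
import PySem

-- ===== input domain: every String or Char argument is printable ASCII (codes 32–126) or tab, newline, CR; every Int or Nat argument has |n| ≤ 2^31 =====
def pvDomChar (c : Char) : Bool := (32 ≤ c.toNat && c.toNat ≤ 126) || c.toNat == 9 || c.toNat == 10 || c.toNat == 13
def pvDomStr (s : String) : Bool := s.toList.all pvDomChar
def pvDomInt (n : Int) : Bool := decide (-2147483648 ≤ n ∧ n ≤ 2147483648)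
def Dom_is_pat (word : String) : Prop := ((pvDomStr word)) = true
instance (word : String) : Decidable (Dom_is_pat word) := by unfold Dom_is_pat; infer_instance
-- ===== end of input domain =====

-- B replaces A's per-split min/max scans by one suffix-maxima precompute plus a
-- running prefix minimum per call (objective: faster).

-- ===== PORT A =====

-- ord(c): exact for every Char (Python code point = Char.toNat)
def pyOrd (c : Char) : Int := (c.toNat : Int)

mutual
-- is_pat's body on the char list of the word
def patA (cs : List Char) : Bool :=
  if cs.length < 2 then true
  else patALoop cs 0
  termination_by (cs.length, cs.length + 1)
  decreasing_by exact Prod.Lex.right _ (by omega)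
-- the 'for m in range(1, len(word))' loop; parameter k encodes loop index m = k+1
def patALoop (cs : List Char) (k : Nat) : Bool :=
  if _h : k + 1 < cs.length then
    let s1 := PySem.List.slice cs none (some ((k + 1 : Nat) : Int))   -- word[:m]
    let s2 := PySem.List.slice cs (some ((k + 1 : Nat) : Int)) none   -- word[m:]
    match PySem.List.min? (s1.map pyOrd) (fun x => x),
          PySem.List.max? (s2.map pyOrd) (fun x => x) with
    | some mn, some mx =>
      if mn ≤ mx then patALoop cs (k + 1)                             -- continue
      -- s1[::-1], s2[::-1] are the reverses (PySem.List.slice?_none_none_neg_one)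
      else if patA s1.reverse && patA s2.reverse then true
      else patALoop cs (k + 1)
    | _, _ => patALoop cs (k + 1)  -- unreachable: s1 and s2 are nonempty for 1 ≤ m < len
  else false
  termination_by (cs.length, cs.length - k)
  decreasing_by
    all_goals first
      | (refine Prod.Lex.right _ ?_; omega)
      | (refine Prod.Lex.left _ _ ?_; rw [PySem.List.slice_to_natCast]; simp; omega)
      | (refine Prod.Lex.left _ _ ?_; rw [PySem.List.slice_from_natCast]; simp; omega)
end

def is_pat (word : String) : Bool := patA word.toList

-- ===== PORT B =====

-- Source B's _sufmax: one backward pass with a running maximum, appended then reversed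
def sufMaxB (cs : List Int) : List Int :=
  (cs.reverse.foldl
    (fun (st : Option Int × List Int) c =>
      let hi := match st.1 with
        | none => c
        | some h => if c > h then c else h
      (some hi, st.2 ++ [hi]))
    (none, [])).2.reverse

mutual
-- Source B's _pat
def patB (cs : List Int) : Bool :=
  if cs.length < 2 then true
  else patBLoop cs (sufMaxB cs) (PySem.List.pyGetD cs 0 0) 0
  termination_by (cs.length, cs.length + 1)
  decreasing_by exact Prod.Lex.right _ (by omega)
-- Source B's 'for m in range(1, n)' loop carrying the running prefix minimum lo;
-- parameter k encodes loop index m = k+1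
def patBLoop (cs suf : List Int) (lo : Int) (k : Nat) : Bool :=
  if _h : k + 1 < cs.length then
    if lo > PySem.List.pyGetD suf ((k + 1 : Nat) : Int) 0
        && patB (PySem.List.slice cs none (some ((k + 1 : Nat) : Int))).reverse
        && patB (PySem.List.slice cs (some ((k + 1 : Nat) : Int)) none).reverse then
      true
    else
      let c := PySem.List.pyGetD cs ((k + 1 : Nat) : Int) 0
      patBLoop cs suf (if c < lo then c else lo) (k + 1)
  else false
  termination_by (cs.length, cs.length - k)
  decreasing_by
    all_goals first
      | (refine Prod.Lex.right _ ?_; omega)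
      | (refine Prod.Lex.left _ _ ?_; rw [PySem.List.slice_to_natCast]; simp; omega)
      | (refine Prod.Lex.left _ _ ?_; rw [PySem.List.slice_from_natCast]; simp; omega)
end

def is_pat_alt (word : String) : Bool := patB (word.toList.map pyOrd)

-- ===== PRECONDITION & SPEC =====
def Spec_is_pat (word : String) (out : Bool) : Prop := out = is_pat_alt word
instance (word : String) (out : Bool) : Decidable (Spec_is_pat word out) := by unfold Spec_is_pat; infer_instance

-- ===== CLAIM (what is proved, stated in full; the proofs are below) =====
def Claim_equal_is_pat : Prop := ∀ (word : String), Dom_is_pat word → Spec_is_pat word (is_pat word)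

-- ===== LEMMAS AND PROOFS =====

def sufSpec : List Int → List Int
  | [] => []
  | x :: t => (match (sufSpec t).head? with | none => x | some h => if x > h then x else h) :: sufSpec t

def gStep (st : Option Int × List Int) (c : Int) : Option Int × List Int :=
  let hi := match st.1 with
    | none => c
    | some h => if c > h then c else h
  (some hi, st.2 ++ [hi])

theorem foldl_gStep (xs : List Int) :
    xs.reverse.foldl gStep (none, []) = ((sufSpec xs).head?, (sufSpec xs).reverse) := by
  induction xs with
  | nil => rfl
  | cons x t ih =>
    rw [List.reverse_cons, List.foldl_append, ih]
    simp [gStep, sufSpec]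

theorem length_sufSpec (xs : List Int) : (sufSpec xs).length = xs.length := by
  induction xs with
  | nil => rfl
  | cons x t ih => simp [sufSpec, ih]

theorem foldl_max_max (t : List Int) (a : Int) : ∀ b, t.foldl max (max a b) = max a (t.foldl max b) := by
  induction t with
  | nil => intro b; rfl
  | cons c t ih => intro b; simp only [List.foldl_cons, max_assoc, ih]

theorem max?_drop (xs : List Int) : ∀ m, m < xs.length →
    PySem.List.max? (xs.drop m) (fun y => y) = some ((sufSpec xs).getD m 0) := by
  induction xs with
  | nil => intro m h; simp at h
  | cons x t ih =>
    intro m hm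
    match m with
    | 0 =>
      rw [List.drop_zero, PySem.List.max?_id_cons]
      simp only [sufSpec, List.getD_cons_zero]
      match ht : t with
      | [] => simp [sufSpec]
      | y :: t' =>
        have h0 := ih 0 (by simp)
        rw [List.drop_zero, PySem.List.max?_id_cons] at h0
        have hh : (sufSpec (y :: t')).head? = some (t'.foldl max y) := by
          cases hs : sufSpec (y :: t') with
          | nil => exact absurd (congrArg List.length hs) (by simp [length_sufSpec])
          | cons a l =>
            rw [hs] at h0
            simp only [List.getD_cons_zero] at h0
            simp [h0]
        rw [hh]
        simp only [List.foldl_cons, foldl_max_max t' x y, Option.some.injEq]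
        rcases le_or_gt x (t'.foldl max y) with hle | hlt
        · rw [if_neg (not_lt.mpr hle), max_eq_right hle]
        · rw [if_pos hlt, max_eq_left hlt.le]
    | k + 1 =>
      rw [List.drop_succ_cons]
      rw [ih k (by simpa using hm)]
      simp [sufSpec]

theorem sufMaxB_eq (xs : List Int) : sufMaxB xs = sufSpec xs := by
  have h0 : sufMaxB xs = (xs.reverse.foldl gStep (none, [])).2.reverse := rfl
  rw [h0, foldl_gStep, List.reverse_reverse]

theorem min?_take_cons (x : Int) (t : List Int) (k : Nat) :
    PySem.List.min? ((x :: t).take (k + 1)) (fun y => y) = some ((t.take k).foldl min x) := by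
  rw [List.take_succ_cons, PySem.List.min?_id_cons]

theorem foldl_min_step (t : List Int) (x : Int) (k : Nat) (hk : k < t.length) :
    (t.take (k + 1)).foldl min x = min ((t.take k).foldl min x) (t.getD k 0) := by
  rw [List.take_add_one, List.foldl_append, List.getElem?_eq_getElem hk]
  simp [List.getD, List.getElem?_eq_getElem hk]

theorem if_lt_min (lo c : Int) : (if c < lo then c else lo) = min lo c := by
  rcases lt_or_ge c lo with h | h
  · rw [if_pos h, min_eq_right h.le]
  · rw [if_neg (not_lt.mpr h), min_eq_left h]

theorem min?_take_succ (xs : List Int) (k : Nat) (lo : Int) (hk : k + 1 < xs.length)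
    (h : PySem.List.min? (xs.take (k + 1)) (fun y => y) = some lo) :
    PySem.List.min? (xs.take (k + 2)) (fun y => y) = some (min lo (xs.getD (k + 1) 0)) := by
  cases xs with
  | nil => simp at hk
  | cons x t =>
    rw [min?_take_cons] at h
    rw [show k + 2 = (k + 1) + 1 from rfl, min?_take_cons, Option.some.injEq]
    have hkt : k < t.length := by simpa using hk
    rw [foldl_min_step t x k hkt]
    simp only [Option.some.injEq] at h
    rw [h, List.getD_cons_succ]

theorem loop_eq : ∀ (fuel : Nat) (cs : List Char) (k : Nat) (lo : Int),
    cs.length - (k + 1) ≤ fuel →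
    (∀ ds : List Char, ds.length < cs.length → patA ds = patB (ds.map pyOrd)) →
    PySem.List.min? ((cs.map pyOrd).take (k + 1)) (fun y => y) = some lo →
    patALoop cs k = patBLoop (cs.map pyOrd) (sufSpec (cs.map pyOrd)) lo k := by
  intro fuel
  induction fuel with
  | zero =>
    intro cs k lo hf ihA hlo
    rw [patALoop, patBLoop, dif_neg (by omega), dif_neg (by simp; omega)]
  | succ f ihf =>
    intro cs k lo hf ihA hlo
    by_cases h : k + 1 < cs.length
    · have hxlen : (cs.map pyOrd).length = cs.length := by simp
      have hmx := max?_drop (cs.map pyOrd) (k+1) (by omega)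
      rw [patALoop, patBLoop, dif_pos h, dif_pos (by omega)]
      simp only [PySem.List.slice_to_natCast, PySem.List.slice_from_natCast,
        List.map_take, List.map_drop, hlo, hmx, PySem.List.pyGetD_natCast]
      have hnext : patALoop cs (k + 1) =
          patBLoop (cs.map pyOrd) (sufSpec (cs.map pyOrd))
            (if (cs.map pyOrd).getD (k + 1) 0 < lo then (cs.map pyOrd).getD (k + 1) 0 else lo)
            (k + 1) := by
        rw [if_lt_min]
        exact ihf cs (k + 1) _ (by omega) ihA (min?_take_succ _ k lo (by omega) hlo)
      by_cases hc : lo ≤ (sufSpec (cs.map pyOrd)).getD (k + 1) 0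
      · rw [if_pos hc, decide_eq_false (not_lt.mpr hc)]
        simp only [Bool.false_and, Bool.false_eq_true, if_false]
        exact hnext
      · rw [if_neg hc, decide_eq_true (not_le.mp hc)]
        have e1 : patA (cs.take (k + 1)).reverse = patB ((cs.map pyOrd).take (k + 1)).reverse := by
          rw [ihA (cs.take (k + 1)).reverse (by simp; omega), List.map_reverse, List.map_take]
        have e2 : patA (cs.drop (k + 1)).reverse = patB ((cs.map pyOrd).drop (k + 1)).reverse := by
          rw [ihA (cs.drop (k + 1)).reverse (by simp; omega), List.map_reverse, List.map_drop]
        rw [e1, e2, Bool.true_and]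
        cases hb : (patB ((cs.map pyOrd).take (k + 1)).reverse && patB ((cs.map pyOrd).drop (k + 1)).reverse) with
        | true => simp
        | false =>
          simp only [Bool.false_eq_true, if_false]
          exact hnext
    · rw [patALoop, patBLoop, dif_neg h, dif_neg (by simp [h])]

theorem patA_eq_patB_aux : ∀ (n : Nat) (cs : List Char), cs.length = n → patA cs = patB (cs.map pyOrd) := by
  intro n
  induction n using Nat.strong_induction_on with
  | _ n ihn =>
    intro cs hn
    have ihA : ∀ ds : List Char, ds.length < cs.length → patA ds = patB (ds.map pyOrd) := by
      intro ds hds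
      exact ihn ds.length (by omega) ds rfl
    rw [patA, patB]
    by_cases h2 : cs.length < 2
    · rw [if_pos h2, if_pos (by simpa using h2)]
    · rw [if_neg h2, if_neg (by simpa using h2), sufMaxB_eq]
      cases hcs : cs.map pyOrd with
      | nil =>
        have hl := congrArg List.length hcs
        rw [List.length_map, List.length_nil] at hl
        omega
      | cons x t =>
        have hlo : PySem.List.min? ((cs.map pyOrd).take 1) (fun y => y) = some (PySem.List.pyGetD (cs.map pyOrd) 0 0) := by
          rw [hcs]
          rw [List.take_succ_cons, List.take_zero, PySem.List.min?_id_cons, PySem.List.pyGetD_zero_cons]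
          rfl
        rw [← hcs]
        exact loop_eq cs.length cs 0 _ (Nat.sub_le _ _) ihA hlo

theorem patA_eq_patB (cs : List Char) : patA cs = patB (cs.map pyOrd) :=
  patA_eq_patB_aux cs.length cs rfl

-- ===== VERDICT (by name: the statement is the Claim_ definition above) =====
theorem is_pat_spec : Claim_equal_is_pat := by
  intro word _
  unfold Spec_is_pat is_pat is_pat_alt
  exact patA_eq_patB word.toList
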